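-- pv_equiv track=rewrite | github.com/calebjcourtney/advent-of-code | 2025/python/day02.py | p2_invalid
-- ===== SOURCE A (Python) =====
-- def p2_invalid(num):
--     num_str = str(num)
--
--     for prefix_len in range(1, len(num_str) // 2 + 1):
--         prefix = num_str[:prefix_len]
--
--         if len(num_str) % prefix_len == 0:
--             repetitions = len(num_str) // prefix_len
--
--             if repetitions >= 2 and prefix * repetitions == num_str:
--                 return True
--
--     return False
-- ===== SOURCE B (Python) =====
-- def p2_invalid(num):
--     s = str(num)
--     n = len(s)
--     return any(
--         n % p == 0
--         and all(p % q for q in range(2, p))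
--         and s[: n // p] * p == s
--         for p in range(2, n + 1)
--     )
-- ===== Notes on version B (the rewrite author's own statement) =====
-- stated objective: alternative
-- what changed: B enumerates candidate repetition counts and keeps only the prime ones (primality by trial division), checking one prefix per prime divisor of len(str(num)), instead of A's scan over every prefix length up to half the string; correctness rests on the fact that a string is a nontrivial repetition iff it is a p-fold repetition for some prime p dividing its length.
import Mathlib
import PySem

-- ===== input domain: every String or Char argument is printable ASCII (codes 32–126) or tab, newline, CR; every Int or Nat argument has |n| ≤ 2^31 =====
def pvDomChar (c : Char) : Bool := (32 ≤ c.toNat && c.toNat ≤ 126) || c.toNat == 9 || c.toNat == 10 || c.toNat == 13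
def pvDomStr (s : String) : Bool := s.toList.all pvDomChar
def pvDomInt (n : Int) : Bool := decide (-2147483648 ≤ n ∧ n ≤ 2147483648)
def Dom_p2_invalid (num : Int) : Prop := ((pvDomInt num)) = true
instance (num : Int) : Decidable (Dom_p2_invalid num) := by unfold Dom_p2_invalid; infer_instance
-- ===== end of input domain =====

-- B replaces A's scan over every prefix length up to half the string by one check per PRIME repetition
-- count dividing len(str(num)) (primality by trial division); objective: alternative algorithm, same cost class.

-- shared primitive: Python's str * int (empty for non-positive counts) — used by both sources
def pyStrMul (t : List Char) (k : Int) : List Char := (List.replicate k.toNat t).flatten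

-- ===== PORT A =====
def p2_invalid (num : Int) : Bool :=
  let numStr := PySem.Int.toChars num
  (PySem.List.pyRange 1 (PySem.Int.floordiv (numStr.length : Int) 2 + 1) 1).any (fun pl =>
    let pre := PySem.List.slice numStr none (some pl)
    if PySem.Int.mod (numStr.length : Int) pl == 0 then
      let reps := PySem.Int.floordiv (numStr.length : Int) pl
      decide (2 ≤ reps) && (pyStrMul pre reps == numStr)
    else false)

-- ===== PORT B =====
def p2_invalid_alt (num : Int) : Bool :=
  let s := PySem.Int.toChars num
  let n : Int := s.length
  (PySem.List.pyRange 2 (n + 1) 1).any (fun p =>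
    (PySem.Int.mod n p == 0)
    && (PySem.List.pyRange 2 p 1).all (fun q => !(PySem.Int.mod p q == 0))
    && (pyStrMul (PySem.List.slice s none (some (PySem.Int.floordiv n p))) p == s))

-- ===== PRECONDITION & SPEC =====
def Spec_p2_invalid (num : Int) (out : Bool) : Prop := out = p2_invalid_alt num
instance (num : Int) (out : Bool) : Decidable (Spec_p2_invalid num out) := by unfold Spec_p2_invalid; infer_instance

-- ===== CLAIM (what is proved, stated in full; the proofs are below) =====
def Claim_equal_p2_invalid : Prop := ∀ (num : Int), Dom_p2_invalid num → Spec_p2_invalid num (p2_invalid num)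

-- ===== LEMMAS AND PROOFS =====

-- A's loop returns true iff some prefix length d ≤ n/2 divides n and d-periodically tiles s (Nat form)
theorem bridgeA (s : List Char) :
    ((PySem.List.pyRange 1 (PySem.Int.floordiv (s.length : Int) 2 + 1) 1).any (fun pl =>
      let pre := PySem.List.slice s none (some pl)
      if PySem.Int.mod (s.length : Int) pl == 0 then
        let reps := PySem.Int.floordiv (s.length : Int) pl
        decide (2 ≤ reps) && (pyStrMul pre reps == s)
      else false)) = true ↔
    ∃ d : Nat, 1 ≤ d ∧ d ≤ s.length / 2 ∧ s.length % d = 0 ∧ 2 ≤ s.length / d ∧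
      (List.replicate (s.length / d) (s.take d)).flatten = s := by
  have h2 : PySem.Int.floordiv (s.length : Int) 2 = ((s.length / 2 : Nat) : Int) := by
    exact_mod_cast PySem.Int.floordiv_natCast s.length 2
  rw [List.any_eq_true]
  constructor
  · rintro ⟨pl, hmem, hbody⟩
    rw [PySem.List.mem_pyRange_one] at hmem
    obtain ⟨h1, hlt⟩ := hmem
    obtain ⟨d, rfl⟩ : ∃ d : Nat, pl = (d : Int) := ⟨pl.toNat, (Int.toNat_of_nonneg (by omega)).symm⟩
    rw [h2] at hlt
    rw [PySem.Int.mod_natCast, PySem.Int.floordiv_natCast, PySem.List.slice_to_natCast] at hbody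
    simp only [pyStrMul, Int.toNat_natCast, beq_iff_eq] at hbody
    split_ifs at hbody with hc
    simp only [Bool.and_eq_true, decide_eq_true_eq, beq_iff_eq] at hbody
    exact ⟨d, by omega, by omega, by exact_mod_cast hc, by exact_mod_cast hbody.1, hbody.2⟩
  · rintro ⟨d, h1, hhalf, hmod, hreps, heq⟩
    refine ⟨(d : Int), ?_, ?_⟩
    · rw [PySem.List.mem_pyRange_one, h2]; omega
    · rw [PySem.Int.mod_natCast, PySem.Int.floordiv_natCast, PySem.List.slice_to_natCast]
      simp only [pyStrMul, Int.toNat_natCast, beq_iff_eq]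
      rw [if_pos (by exact_mod_cast hmod)]
      simp only [Bool.and_eq_true, decide_eq_true_eq, beq_iff_eq]
      exact ⟨by exact_mod_cast hreps, heq⟩

-- B's generator returns true iff some PRIME p ≤ n divides n and the n/p-prefix tiles s p times (Nat form)
theorem bridgeB (s : List Char) :
    ((PySem.List.pyRange 2 ((s.length : Int) + 1) 1).any (fun p =>
      (PySem.Int.mod (s.length : Int) p == 0)
      && (PySem.List.pyRange 2 p 1).all (fun q => !(PySem.Int.mod p q == 0))
      && (pyStrMul (PySem.List.slice s none (some (PySem.Int.floordiv (s.length : Int) p))) p == s))) = true ↔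
    ∃ p : Nat, p ≤ s.length ∧ s.length % p = 0 ∧ Nat.Prime p ∧
      (List.replicate p (s.take (s.length / p))).flatten = s := by
  rw [List.any_eq_true]
  constructor
  · rintro ⟨pi, hmem, hbody⟩
    rw [PySem.List.mem_pyRange_one] at hmem
    obtain ⟨h2le, hlt⟩ := hmem
    obtain ⟨p, rfl⟩ : ∃ p : Nat, pi = (p : Int) := ⟨pi.toNat, (Int.toNat_of_nonneg (by omega)).symm⟩
    rw [PySem.Int.mod_natCast, PySem.Int.floordiv_natCast, PySem.List.slice_to_natCast] at hbody
    simp only [pyStrMul, Int.toNat_natCast, Bool.and_eq_true, beq_iff_eq, List.all_eq_true,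
      Bool.not_eq_true', beq_eq_false_iff_ne] at hbody
    obtain ⟨⟨hmod, hprim⟩, heq⟩ := hbody
    refine ⟨p, by omega, by exact_mod_cast hmod, ?_, heq⟩
    rw [Nat.prime_def_lt']
    refine ⟨by omega, fun m hm2 hmlt hdvd => ?_⟩
    have hne := hprim (m : Int) (by rw [PySem.List.mem_pyRange_one]; omega)
    rw [PySem.Int.mod_natCast] at hne
    exact hne (by exact_mod_cast Nat.dvd_iff_mod_eq_zero.mp hdvd)
  · rintro ⟨p, hle, hmod, hprime, heq⟩
    have h2le : 2 ≤ p := hprime.two_le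
    refine ⟨(p : Int), by rw [PySem.List.mem_pyRange_one]; omega, ?_⟩
    rw [PySem.Int.mod_natCast, PySem.Int.floordiv_natCast, PySem.List.slice_to_natCast]
    simp only [pyStrMul, Int.toNat_natCast, Bool.and_eq_true, beq_iff_eq, List.all_eq_true,
      Bool.not_eq_true', beq_eq_false_iff_ne]
    refine ⟨⟨by exact_mod_cast hmod, fun q hq => ?_⟩, heq⟩
    rw [PySem.List.mem_pyRange_one] at hq
    obtain ⟨m, rfl⟩ : ∃ m : Nat, q = (m : Int) := ⟨q.toNat, (Int.toNat_of_nonneg (by omega)).symm⟩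
    rw [PySem.Int.mod_natCast]
    intro hz
    have hmz : p % m = 0 := by exact_mod_cast hz
    exact absurd (Nat.dvd_of_mod_eq_zero hmz) ((Nat.prime_def_lt'.mp hprime).2 m (by omega) (by omega))

theorem rep_mul {α : Type} (a b : Nat) (t : List α) :
    (List.replicate (a * b) t).flatten = (List.replicate a ((List.replicate b t).flatten)).flatten := by
  induction a with
  | zero => simp
  | succ a ih =>
    rw [show (a + 1) * b = b + a * b by ring, List.replicate_add, List.flatten_append, ih,
      List.replicate_succ, List.flatten_cons]

theorem take_flatten_replicate {α : Type} (p : Nat) (hp : 1 ≤ p) (u : List α) :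
    ((List.replicate p u).flatten).take u.length = u := by
  obtain ⟨q, rfl⟩ : ∃ q, p = q + 1 := ⟨p - 1, by omega⟩
  rw [List.replicate_succ, List.flatten_cons, List.take_left]

-- the mathematical heart: a nontrivial repetition exists iff one with a PRIME repetition count exists
theorem main_iff (s : List Char) :
    (∃ d : Nat, 1 ≤ d ∧ d ≤ s.length / 2 ∧ s.length % d = 0 ∧ 2 ≤ s.length / d ∧
      (List.replicate (s.length / d) (s.take d)).flatten = s) ↔
    (∃ p : Nat, p ≤ s.length ∧ s.length % p = 0 ∧ Nat.Prime p ∧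
      (List.replicate p (s.take (s.length / p))).flatten = s) := by
  constructor
  · rintro ⟨d, h1, hhalf, hmod, hk2, heq⟩
    have hnpos : 0 < s.length := by omega
    have hddvd : d ∣ s.length := Nat.dvd_of_mod_eq_zero hmod
    obtain ⟨k, hk⟩ : ∃ k, s.length / d = k := ⟨_, rfl⟩
    rw [hk] at heq hk2
    have hndk : s.length = d * k := by
      rw [← hk, Nat.mul_comm, Nat.div_mul_cancel hddvd]
    obtain ⟨t, ht⟩ : ∃ t, s.take d = t := ⟨_, rfl⟩
    rw [ht] at heq
    have htlen : t.length = d := by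
      rw [← ht, List.length_take]; omega
    obtain ⟨p, hp⟩ : ∃ p, k.minFac = p := ⟨_, rfl⟩
    have hprime : p.Prime := hp ▸ Nat.minFac_prime (by omega)
    have hpk : p ∣ k := hp ▸ Nat.minFac_dvd k
    obtain ⟨m, hm⟩ : ∃ m, k / p = m := ⟨_, rfl⟩
    have hkpm : k = p * m := by rw [← hm, Nat.mul_div_cancel' hpk]
    have hpn : p ∣ s.length := hpk.trans ⟨d, by rw [hndk]; ring⟩
    have hnp : s.length / p = m * d := by
      have h : s.length = p * (m * d) := by rw [hndk, hkpm]; ring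
      rw [h, Nat.mul_div_cancel_left _ hprime.pos]
    obtain ⟨u, hu⟩ : ∃ u, (List.replicate m t).flatten = u := ⟨_, rfl⟩
    have hsu : s = (List.replicate p u).flatten := by
      rw [← heq, hkpm, rep_mul, hu]
    have hulen : u.length = m * d := by
      simp [← hu, htlen, Nat.mul_comm]
    have htake : s.take (s.length / p) = u := by
      rw [hnp, ← hulen]
      conv_lhs => rw [hsu]
      exact take_flatten_replicate p hprime.one_lt.le u
    refine ⟨p, Nat.le_of_dvd hnpos hpn, Nat.dvd_iff_mod_eq_zero.mp hpn, hprime, ?_⟩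
    rw [htake, ← hsu]
  · rintro ⟨p, hle, hmod, hprime, heq⟩
    have h2 : 2 ≤ p := hprime.two_le
    have hpn : p ∣ s.length := Nat.dvd_of_mod_eq_zero hmod
    refine ⟨s.length / p, ?_, ?_, ?_, ?_, ?_⟩
    · exact (Nat.one_le_div_iff (by omega)).mpr hle
    · exact Nat.div_le_div_left h2 (by omega)
    · exact Nat.dvd_iff_mod_eq_zero.mp (Nat.div_dvd_of_dvd hpn)
    · rw [Nat.div_div_self hpn (by omega)]; exact h2
    · rw [Nat.div_div_self hpn (by omega)]; exact heq

-- ===== VERDICT (by name: the statement is the Claim_ definition above) =====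
theorem p2_invalid_spec : Claim_equal_p2_invalid := by
  intro num _
  unfold Spec_p2_invalid
  have hA : p2_invalid num = true ↔ _ := bridgeA (PySem.Int.toChars num)
  have hB : p2_invalid_alt num = true ↔ _ := bridgeB (PySem.Int.toChars num)
  exact Bool.eq_iff_iff.mpr (by rw [hA, hB, main_iff])
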